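-- pv_equiv track=rewrite | github.com/ervanalb/arcade | src/pga_gen.py | fix_float
-- ===== SOURCE A (Python) =====
-- def fix_float(s):
--     """ Replaces bare "0" with "0." for rust. """
--
--     s = s.replace("*", " * ")
--
--     def fix(term):
--         import sys
--         out = ""
--         i = 0
--         needs_dot = False
--         while i < len(term) and term[i] in "(0123456789.-":
--             if term[i] in "0123456789":
--                 needs_dot = True
--             if term[i] in ".":
--                 needs_dot = False
--                 break
--
--             out += term[i]
--             i += 1
--         if needs_dot:
--             out += "." + term[i:]
--         else:
--             out = term
--         return out
--
--     return " ".join(fix(term) for term in s.split(" "))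
-- ===== SOURCE B (Python) =====
-- def fix_float(s):
--     """ Replaces bare "0" with "0." for rust. """
--
--     def fix(term):
--         tail = term.lstrip("(-0123456789")
--         head = term[:len(term) - len(tail)]
--         if tail.startswith(".") or not any(c in "0123456789" for c in head):
--             return term
--         return head + "." + tail
--
--     return " ".join(map(fix, s.replace("*", " * ").split(" ")))
-- ===== Notes on version B (the rewrite author's own statement) =====
-- stated objective: simpler
-- what changed: Replaces A's per-term character-by-character while loop with its out/i/needs_dot state machine by a loop-free decomposition: lstrip the numeric-prefix characters off each term, then decide from the tail's first character and a digit test on the stripped prefix whether to insert the dot.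
import Mathlib
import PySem

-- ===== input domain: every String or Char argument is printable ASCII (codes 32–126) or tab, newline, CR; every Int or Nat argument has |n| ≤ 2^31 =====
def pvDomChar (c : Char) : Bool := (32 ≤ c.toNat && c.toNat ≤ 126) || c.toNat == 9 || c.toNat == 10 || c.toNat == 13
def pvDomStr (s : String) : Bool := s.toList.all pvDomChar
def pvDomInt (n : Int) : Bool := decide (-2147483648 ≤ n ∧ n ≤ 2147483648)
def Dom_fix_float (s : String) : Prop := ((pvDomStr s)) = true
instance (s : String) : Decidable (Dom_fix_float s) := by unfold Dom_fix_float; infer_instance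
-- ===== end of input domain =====

-- B replaces A's per-term while-loop state machine (out/i/needs_dot) by a loop-free
-- lstrip/slice decomposition of each term (objective: simpler); same return values.

-- ===== PORT A =====
-- char classes of A's inner `fix`: `term[i] in "(0123456789.-"` and `term[i] in "0123456789"`
def pAcls (c : Char) : Bool := ("(0123456789.-".toList).contains c
def pAdig (c : Char) : Bool := ("0123456789".toList).contains c
-- the while loop of A's inner `fix`: state = (remaining chars, out, needs_dot); `term` is the whole token
def fixA_go (term : List Char) : List Char → List Char → Bool → List Char
  | [], out, nd => if nd then out ++ ['.'] else term
  | c :: rest, out, nd =>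
    if pAcls c then
      let nd' := if pAdig c then true else nd
      if c = '.' then term            -- needs_dot = False; break → out = term
      else fixA_go term rest (out ++ [c]) nd'
    else
      if nd then out ++ '.' :: (c :: rest) else term

def fix_float (s : String) : String :=
  let s := PySem.Str.replace s "*" " * "
  String.ofList (PySem.Chars.join " ".toList ((PySem.Chars.splitOn s.toList " ".toList).map
    (fun t => fixA_go t t [] false)))

-- ===== PORT B =====
def pBcls (c : Char) : Bool := ("(-0123456789".toList).contains c   -- lstrip's char set (digit test reuses pAdig, the same literal char class)
-- term.lstrip("(-0123456789") is ported as dropWhile on that char set: exact (removes the maximal leading run)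
def fixB (term : List Char) : List Char :=
  if PySem.Chars.startswith (term.dropWhile pBcls) ".".toList
      || !((term.take (term.length - (term.dropWhile pBcls).length)).any pAdig) then term
  else term.take (term.length - (term.dropWhile pBcls).length) ++ '.' :: term.dropWhile pBcls

def fix_float_alt (s : String) : String :=
  String.ofList (PySem.Chars.join " ".toList
    ((PySem.Chars.splitOn (PySem.Str.replace s "*" " * ").toList " ".toList).map fixB))

-- ===== PRECONDITION & SPEC =====
def Spec_fix_float (s : String) (out : String) : Prop := out = fix_float_alt s
instance (s : String) (out : String) : Decidable (Spec_fix_float s out) := by unfold Spec_fix_float; infer_instance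

-- ===== CLAIM (what is proved, stated in full; the proofs are below) =====
def Claim_equal_fix_float : Prop := ∀ (s : String), Dom_fix_float s → Spec_fix_float s (fix_float s)

-- ===== LEMMAS AND PROOFS =====

theorem pAcls_iff (c : Char) : pAcls c = true ↔ c = '.' ∨ pBcls c = true := by
  simp [pAcls, pBcls]
  tauto

theorem pBcls_dot : pBcls '.' = false := by decide

theorem go_spec (term : List Char) : ∀ (rest out : List Char) (nd : Bool),
    fixA_go term rest out nd =
      if (rest.dropWhile pBcls).head? = some '.' then term
      else if nd || (rest.takeWhile pBcls).any pAdig then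
        out ++ rest.takeWhile pBcls ++ '.' :: rest.dropWhile pBcls
      else term := by
  intro rest
  induction rest with
  | nil => intro out nd; simp [fixA_go]
  | cons c r ih =>
    intro out nd
    by_cases hA : pAcls c = true
    · rcases (pAcls_iff c).mp hA with hdot | hB
      · subst hdot
        rw [List.dropWhile_cons_of_neg (by simp [pBcls_dot])]
        simp [fixA_go, hA]
      · have hne : c ≠ '.' := by
          intro h; subst h; rw [pBcls_dot] at hB; exact Bool.false_ne_true hB
        have hstep : fixA_go term (c :: r) out nd
            = fixA_go term r (out ++ [c]) (if pAdig c then true else nd) := by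
          simp [fixA_go, hA, hne]
        rw [hstep, ih,
          List.dropWhile_cons_of_pos hB, List.takeWhile_cons_of_pos hB]
        by_cases hd : (r.dropWhile pBcls).head? = some '.'
        · simp [hd]
        · rw [if_neg hd, if_neg hd]
          have hcond : ((if pAdig c then true else nd) || (r.takeWhile pBcls).any pAdig)
              = (nd || (c :: r.takeWhile pBcls).any pAdig) := by
            by_cases hdig : pAdig c = true
            · simp [hdig]
            · simp [hdig]
          rw [hcond]
          by_cases hh : (nd || (c :: r.takeWhile pBcls).any pAdig) = true
          · rw [if_pos hh, if_pos hh]; simp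
          · rw [if_neg hh, if_neg hh]
    · have hnB : pBcls c = false := by
        rcases Bool.eq_false_or_eq_true (pBcls c) with h | h
        · exact absurd ((pAcls_iff c).mpr (Or.inr h)) hA
        · exact h
      have hne : c ≠ '.' := by
        intro h; subst h; exact hA (by decide)
      rw [List.dropWhile_cons_of_neg (by simp [hnB]),
          List.takeWhile_cons_of_neg (by simp [hnB])]
      simp only [fixA_go, hA, if_false, Bool.false_eq_true, List.head?_cons]
      have : ¬ (some c = some '.') := by simp [hne]
      rw [if_neg this]
      cases nd <;> simp

theorem startswith_dot_iff (l : List Char) :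
    PySem.Chars.startswith l ".".toList = true ↔ l.head? = some '.' := by
  rw [PySem.Chars.startswith_iff]
  constructor
  · rintro ⟨u, hu⟩
    rw [← hu]; rfl
  · intro h
    cases l with
    | nil => simp at h
    | cons a l' =>
      simp at h
      subst h
      exact ⟨l', rfl⟩

theorem take_sub_dropWhile (p : Char → Bool) (t : List Char) :
    t.take (t.length - (t.dropWhile p).length) = t.takeWhile p := by
  have hlen := congrArg List.length (List.takeWhile_append_dropWhile (p := p) (l := t))
  rw [List.length_append] at hlen
  have h1 : t.length - (t.dropWhile p).length = (t.takeWhile p).length := by omega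
  rw [h1]
  exact (List.prefix_iff_eq_take.mp (List.takeWhile_prefix p)).symm

theorem fix_eq (t : List Char) : fixA_go t t [] false = fixB t := by
  rw [go_spec]
  unfold fixB
  rw [take_sub_dropWhile]
  by_cases hd : (t.dropWhile pBcls).head? = some '.'
  · have hsw : PySem.Chars.startswith (t.dropWhile pBcls) ".".toList = true :=
      (startswith_dot_iff _).mpr hd
    rw [if_pos hd, if_pos (by simp only [Bool.or_eq_true]; exact Or.inl (by simpa using hsw))]
  · have hsw : PySem.Chars.startswith (t.dropWhile pBcls) ".".toList = false := by
      rcases Bool.eq_false_or_eq_true (PySem.Chars.startswith (t.dropWhile pBcls) ".".toList) with h | h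
      · exact absurd ((startswith_dot_iff _).mp h) hd
      · exact h
    rw [if_neg hd, hsw]
    have hdig : (t.takeWhile pBcls).any pAdig = (t.takeWhile pBcls).any pAdig := rfl
    rw [Bool.false_or, hdig]
    by_cases ha : (t.takeWhile pBcls).any pAdig = true
    · rw [if_pos ha]
      simp [ha]
    · rw [if_neg ha]
      simp [ha]

-- ===== VERDICT (by name: the statement is the Claim_ definition above) =====
theorem fix_float_spec : Claim_equal_fix_float := by
  intro s _
  unfold Spec_fix_float fix_float fix_float_alt
  have h : (fun t : List Char => fixA_go t t [] false) = fixB := by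
    funext t; rw [fix_eq]
  rw [h]
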